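-- pv_equiv track=rewrite | github.com/allanVvz/brain-plataform | api/services/knowledge_graph.py | _prefix_overlap
-- ===== SOURCE A (Python) =====
-- def _common_prefix_len(a: str, b: str) -> int:
--     """Return the length of the longest common prefix of a and b."""
--     n = 0
--     for ca, cb in zip(a, b):
--         if ca != cb:
--             break
--         n += 1
--     return n
--
-- def _prefix_overlap(needle: str, haystack_tokens: set[str], min_prefix: int = 4) -> bool:
--     """True when `needle` shares a prefix of at least min_prefix chars with
--     any token in haystack_tokens. Useful for Portuguese plural/singular
--     pairs like modal/modais, papel/papeis, animal/animais."""
--     if len(needle) < min_prefix: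
--         return False
--     for tok in haystack_tokens:
--         if len(tok) < min_prefix:
--             continue
--         if _common_prefix_len(needle, tok) >= min_prefix:
--             return True
--     return False
-- ===== SOURCE B (Python) =====
-- def _prefix_overlap(needle: str, haystack_tokens: set[str], min_prefix: int = 4) -> bool:
--     if len(needle) < min_prefix:
--         return False
--     prefixes = {tok[:min_prefix] for tok in haystack_tokens if len(tok) >= min_prefix}
--     return needle[:min_prefix] in prefixes
-- ===== Notes on version B (the rewrite author's own statement) =====
-- stated objective: simpler
-- what changed: Replaces the per-token char-by-char longest-common-prefix scan (helper _common_prefix_len) with a prefix index: build the set of min_prefix-long token prefixes once and answer with one membership lookup of needle's prefix.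
-- outside the precondition, e.g. on _prefix_overlap('ab', {'cd'}, -1): A returns True, B returns False
import Mathlib
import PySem

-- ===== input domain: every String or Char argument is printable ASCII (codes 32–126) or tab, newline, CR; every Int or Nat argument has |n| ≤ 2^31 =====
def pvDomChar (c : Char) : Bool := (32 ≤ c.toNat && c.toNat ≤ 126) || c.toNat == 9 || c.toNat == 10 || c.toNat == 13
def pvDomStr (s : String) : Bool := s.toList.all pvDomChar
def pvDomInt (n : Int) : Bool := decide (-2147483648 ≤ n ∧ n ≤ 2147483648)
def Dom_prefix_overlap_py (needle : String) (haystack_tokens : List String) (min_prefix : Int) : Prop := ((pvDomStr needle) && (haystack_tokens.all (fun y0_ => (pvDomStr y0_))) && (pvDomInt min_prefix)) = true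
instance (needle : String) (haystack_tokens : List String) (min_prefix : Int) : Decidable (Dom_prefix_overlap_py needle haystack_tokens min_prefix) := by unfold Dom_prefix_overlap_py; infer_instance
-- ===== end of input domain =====

-- B replaces A's per-token char-by-char common-prefix scan with a prefix set built once
-- plus a single membership lookup (objective: simpler).

-- ===== PORT A =====
-- _common_prefix_len: zip loop with break at first mismatch
def pvCommonPrefixLen : List Char → List Char → Int
  | a :: as, b :: bs => if a = b then 1 + pvCommonPrefixLen as bs else 0
  | _, _ => 0

-- the 'for tok in haystack_tokens' loop of A
def pvScanA (needle : List Char) (min_prefix : Int) : List String → Bool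
  | [] => false
  | t :: ts =>
      if (t.toList.length : Int) < min_prefix then pvScanA needle min_prefix ts
      else if min_prefix ≤ pvCommonPrefixLen needle t.toList then true
      else pvScanA needle min_prefix ts

def prefix_overlap_py (needle : String) (haystack_tokens : List String) (min_prefix : Int) : Bool :=
  if (needle.toList.length : Int) < min_prefix then false
  else pvScanA needle.toList min_prefix haystack_tokens

-- ===== PORT B =====
def prefix_overlap_py_alt (needle : String) (haystack_tokens : List String) (min_prefix : Int) : Bool :=
  if (needle.toList.length : Int) < min_prefix then false
  else
    let prefixes : PySem.Set (List Char) :=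
      PySem.Set.ofList
        ((haystack_tokens.filter (fun t => min_prefix ≤ (t.toList.length : Int))).map
          (fun t => PySem.List.slice t.toList none (some min_prefix)))
    PySem.Set.contains prefixes (PySem.List.slice needle.toList none (some min_prefix))

-- ===== PRECONDITION & SPEC =====
-- Pre_ requires a nonnegative min_prefix: a prefix LENGTH is naturally nonnegative; for a
-- negative min_prefix A's length comparisons trivially accept any token while B's slice
-- follows Python's negative-slice semantics, so A and B can differ there (see cites).
def Pre_prefix_overlap_py (needle : String) (haystack_tokens : List String) (min_prefix : Int) : Prop :=
  0 ≤ min_prefix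
instance (needle : String) (haystack_tokens : List String) (min_prefix : Int) : Decidable (Pre_prefix_overlap_py needle haystack_tokens min_prefix) := by unfold Pre_prefix_overlap_py; infer_instance

def pvWitness_prefix_overlap_py : String × List String × Int := ("modais", ["modal", "xx"], 4)

def Spec_prefix_overlap_py (needle : String) (haystack_tokens : List String) (min_prefix : Int) (out : Bool) : Prop := out = prefix_overlap_py_alt needle haystack_tokens min_prefix
instance (needle : String) (haystack_tokens : List String) (min_prefix : Int) (out : Bool) : Decidable (Spec_prefix_overlap_py needle haystack_tokens min_prefix out) := by unfold Spec_prefix_overlap_py; infer_instance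

-- ===== CLAIM (what is proved, stated in full; the proofs are below) =====
def Claim_equal_prefix_overlap_py : Prop := ∀ (needle : String) (haystack_tokens : List String) (min_prefix : Int), Dom_prefix_overlap_py needle haystack_tokens min_prefix → Pre_prefix_overlap_py needle haystack_tokens min_prefix → Spec_prefix_overlap_py needle haystack_tokens min_prefix (prefix_overlap_py needle haystack_tokens min_prefix)

-- ===== LEMMAS AND PROOFS =====

theorem pvCommonPrefixLen_nonneg (a b : List Char) : 0 ≤ pvCommonPrefixLen a b := by
  induction a generalizing b with
  | nil => simp [pvCommonPrefixLen]
  | cons x as ih =>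
      cases b with
      | nil => simp [pvCommonPrefixLen]
      | cons y bs =>
          simp only [pvCommonPrefixLen]
          split
          · have := ih bs; omega
          · omega

-- m ≤ commonPrefixLen a b  ↔  the first k = m.toNat chars agree, whenever both are long enough
theorem pvCPL_iff_take (k : Nat) (a b : List Char) (ha : k ≤ a.length) (hb : k ≤ b.length) :
    ((k : Int) ≤ pvCommonPrefixLen a b) ↔ a.take k = b.take k := by
  induction k generalizing a b with
  | zero => simpa using pvCommonPrefixLen_nonneg a b
  | succ k ih =>
      cases a with
      | nil => simp at ha
      | cons x as =>
          cases b with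
          | nil => simp at hb
          | cons y bs =>
              simp only [List.length_cons] at ha hb
              simp only [pvCommonPrefixLen, List.take_succ_cons]
              by_cases hxy : x = y
              · subst hxy
                simp only [List.cons.injEq, true_and]
                rw [← ih as bs (by omega) (by omega)]
                push_cast
                omega
              · simp only [if_neg hxy, List.cons.injEq]
                constructor
                · intro h; omega
                · rintro ⟨h, -⟩; exact absurd h hxy

theorem pvScanA_eq_any (needle : List Char) (m : Int) (ts : List String) :
    pvScanA needle m ts =
      ts.any (fun t => decide (m ≤ (t.toList.length : Int)) &&
                       decide (m ≤ pvCommonPrefixLen needle t.toList)) := by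
  induction ts with
  | nil => rfl
  | cons t ts ih =>
      simp only [pvScanA, List.any_cons]
      by_cases h1 : (t.toList.length : Int) < m
      · rw [if_pos h1, ih]
        have hn : ¬ (m ≤ (t.toList.length : Int)) := by omega
        rw [decide_eq_false hn]
        simp
      · rw [if_neg h1]
        have h1' : m ≤ (t.toList.length : Int) := by omega
        rw [decide_eq_true h1']
        by_cases h2 : m ≤ pvCommonPrefixLen needle t.toList
        · rw [if_pos h2, decide_eq_true h2]
          simp
        · rw [if_neg h2, decide_eq_false h2, ih]
          simp

-- ===== VERDICT (by name: the statement is the Claim_ definition above) =====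
theorem prefix_overlap_py_spec : Claim_equal_prefix_overlap_py := by
  intro needle hs m _ hpre
  unfold Spec_prefix_overlap_py prefix_overlap_py prefix_overlap_py_alt
  by_cases hlen : (needle.toList.length : Int) < m
  · rw [if_pos hlen, if_pos hlen]
  · rw [if_neg hlen, if_neg hlen]
    have hpre : (0:Int) ≤ m := hpre
    have hk : m.toNat ≤ needle.toList.length := by omega
    rw [pvScanA_eq_any]
    rw [Bool.eq_iff_iff]
    simp only [PySem.Set.contains_iff, PySem.Set.mem_ofList, List.any_eq_true,
      Bool.and_eq_true, decide_eq_true_eq, List.mem_map, List.mem_filter]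
    constructor
    · rintro ⟨t, ht, hlt, hcpl⟩
      refine ⟨t, ⟨ht, by simpa using hlt⟩, ?_⟩
      rw [PySem.List.slice_to _ hpre, PySem.List.slice_to _ hpre]
      exact ((pvCPL_iff_take m.toNat _ _ hk (by omega)).mp (by rwa [Int.toNat_of_nonneg hpre])).symm
    · rintro ⟨t, ⟨ht, hlt⟩, heq⟩
      have hlt' : m ≤ (t.toList.length : Int) := by simpa using hlt
      refine ⟨t, ht, hlt', ?_⟩
      rw [PySem.List.slice_to _ hpre, PySem.List.slice_to _ hpre] at heq
      have := (pvCPL_iff_take m.toNat needle.toList t.toList hk (by omega)).mpr heq.symm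
      rwa [Int.toNat_of_nonneg hpre] at this
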